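-- pv_equiv track=rewrite | github.com/morolok/AII | aii1_sol.py | e1_d
-- ===== SOURCE A (Python) =====
-- def e1_d(s):
-- 	l=[]
-- 	i=0
-- 	for x in s:
-- 		l.append(x)
-- 		i += 1
-- 		if i == 3:
-- 			l.append('.')
-- 			i=0
-- 	return "".join(l)
-- ===== SOURCE B (Python) =====
-- def e1_d(s):
--     parts = []
--     i = 0
--     n = len(s)
--     while i + 3 <= n:
--         parts.append(s[i:i+3] + '.')
--         i += 3
--     parts.append(s[i:])
--     return ''.join(parts)
-- ===== Notes on version B (the rewrite author's own statement) =====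
-- stated objective: alternative
-- what changed: Replaces the per-character loop with a modulo-3 counter by a chunk-at-a-time loop that emits each full 3-character slice followed by a dot and appends the dotless remainder.
import Mathlib
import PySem

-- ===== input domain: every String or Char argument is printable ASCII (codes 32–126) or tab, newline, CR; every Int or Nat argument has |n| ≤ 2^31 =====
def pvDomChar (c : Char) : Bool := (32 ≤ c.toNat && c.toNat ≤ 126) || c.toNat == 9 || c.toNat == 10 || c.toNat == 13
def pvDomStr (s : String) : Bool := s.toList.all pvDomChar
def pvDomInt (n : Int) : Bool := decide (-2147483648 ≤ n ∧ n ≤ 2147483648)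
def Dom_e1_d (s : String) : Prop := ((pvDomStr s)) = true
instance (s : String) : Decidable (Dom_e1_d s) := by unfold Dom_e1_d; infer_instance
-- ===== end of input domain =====

-- B replaces A's per-character modulo-3 counter loop by a loop peeling one 3-character chunk at a time (alternative decomposition).
-- ===== PORT A =====
def e1dStep (p : List Char × Int) (x : Char) : List Char × Int :=
  let l := p.1 ++ [x]
  let i := p.2 + 1
  if i == 3 then (l ++ ['.'], 0) else (l, i)

def e1_d (s : String) : String :=
  String.mk (s.toList.foldl e1dStep ([], 0)).1

-- ===== PORT B =====
-- Source B's chunk loop: while 3 chars remain emit them plus a dot, then emit the remainder; transcribed as structural recursion on the char list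
def e1dChunk : List Char → List Char
  | a :: b :: c :: rest => a :: b :: c :: '.' :: e1dChunk rest
  | xs => xs

def e1_d_alt (s : String) : String := String.mk (e1dChunk s.toList)

-- ===== PRECONDITION & SPEC =====
def Spec_e1_d (s : String) (out : String) : Prop := out = e1_d_alt s
instance (s : String) (out : String) : Decidable (Spec_e1_d s out) := by unfold Spec_e1_d; infer_instance

-- ===== CLAIM =====
def Claim_equal_e1_d : Prop := ∀ (s : String), Dom_e1_d s → Spec_e1_d s (e1_d s)

-- ===== LEMMAS AND PROOFS =====
lemma e1d_fold_chunk : ∀ (xs : List Char) (acc : List Char),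
    (xs.foldl e1dStep (acc, 0)).1 = acc ++ e1dChunk xs := by
  intro xs
  induction xs using e1dChunk.induct with
  | case1 a b c rest ih =>
      intro acc
      have h : List.foldl e1dStep (acc, 0) (a :: b :: c :: rest)
             = List.foldl e1dStep ((((acc ++ [a]) ++ [b]) ++ [c]) ++ ['.'], 0) rest := rfl
      rw [h, ih]
      simp [e1dChunk]
  | case2 xs h =>
      intro acc
      match xs, h with
      | [], _ => simp [e1dChunk]
      | [a], _ => simp [List.foldl, e1dStep, e1dChunk]
      | [a, b], _ => simp [List.foldl, e1dStep, e1dChunk]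
      | a :: b :: c :: rest, h => exact absurd rfl (fun hh => h a b c rest hh)

-- ===== VERDICT =====
theorem e1_d_spec : Claim_equal_e1_d := by
  intro s _
  show e1_d s = e1_d_alt s
  exact congrArg String.mk ((e1d_fold_chunk s.toList []).trans (List.nil_append _))
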